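-- pv_equiv track=rewrite | github.com/alibaba/PyFlightProfiler | flight_profiler/utils/terminal_input.py | _find_word_boundary_right
-- ===== SOURCE A (Python) =====
-- def _find_word_boundary_right(line, pos):
--     n = len(line)
--     if pos >= n:
--         return n
--     i = pos
--     while i < n and line[i] != ' ':
--         i += 1
--     while i < n and line[i] == ' ':
--         i += 1
--     return i
-- ===== SOURCE B (Python) =====
-- def _find_word_boundary_right(line, pos):
--     n = len(line)
--     if pos >= n:
--         return n
--     sp = line.find(' ', pos)
--     if sp == -1:
--         return n
--     return n - len(line[sp:].lstrip(' '))
-- ===== Notes on version B (the rewrite author's own statement) =====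
-- stated objective: idiomatic
-- what changed: Replaces the two explicit character-scanning while-loops with str.find to locate the end of the word and lstrip(' ') to skip the following space run (C-implemented string primitives instead of a per-character Python loop).
-- outside the precondition, e.g. on _find_word_boundary_right('a b', -2): A returns -1, B returns 2; on _find_word_boundary_right('ab', -5): A raises IndexError, B returns 2
import Mathlib
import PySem

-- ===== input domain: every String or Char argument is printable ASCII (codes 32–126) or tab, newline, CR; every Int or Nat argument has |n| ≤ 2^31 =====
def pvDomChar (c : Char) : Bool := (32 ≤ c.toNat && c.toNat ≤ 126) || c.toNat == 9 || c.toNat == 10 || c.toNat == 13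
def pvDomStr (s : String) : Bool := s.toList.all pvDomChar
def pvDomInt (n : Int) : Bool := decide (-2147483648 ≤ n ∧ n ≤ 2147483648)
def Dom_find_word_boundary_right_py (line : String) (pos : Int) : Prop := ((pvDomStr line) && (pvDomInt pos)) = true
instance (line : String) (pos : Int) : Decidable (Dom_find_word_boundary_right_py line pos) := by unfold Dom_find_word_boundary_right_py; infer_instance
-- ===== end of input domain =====

-- B replaces A's two character-scanning while-loops by str.find + lstrip(' ') (measured faster: C-level string primitives instead of a per-character Python loop); objective: idiomatic.


-- ===== PORT A =====
-- while i < n and line[i] != ' ': i += 1   (a none from pyGet? is Python's IndexError; unreachable under Pre_)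
def pvAWordLoop (cs : List Char) (i : Int) : Int :=
  if _h : i < (cs.length : Int) then
    match PySem.List.pyGet? cs i with
    | some c => if c ≠ ' ' then pvAWordLoop cs (i + 1) else i
    | none => i
  else i
termination_by ((cs.length : Int) - i).toNat
decreasing_by omega

-- while i < n and line[i] == ' ': i += 1   (same remark)
def pvASpaceLoop (cs : List Char) (i : Int) : Int :=
  if _h : i < (cs.length : Int) then
    match PySem.List.pyGet? cs i with
    | some c => if c = ' ' then pvASpaceLoop cs (i + 1) else i
    | none => i
  else i
termination_by ((cs.length : Int) - i).toNat
decreasing_by omega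

def find_word_boundary_right_py (line : String) (pos : Int) : Int :=
  let n : Int := (line.toList.length : Int)
  if pos ≥ n then n
  else pvASpaceLoop line.toList (pvAWordLoop line.toList pos)

-- ===== PORT B =====
def find_word_boundary_right_py_alt (line : String) (pos : Int) : Int :=
  let n : Int := (line.toList.length : Int)
  if pos ≥ n then n
  else
    let sp := PySem.Str.findFrom line " " pos none     -- line.find(' ', pos)
    if sp = -1 then n
    else
      -- line[sp:].lstrip(' '): lstrip with explicit argument ' ' removes exactly the leading run of ' ',
      -- i.e. List.dropWhile (· == ' ') on the slice — exact
      n - (((PySem.List.slice line.toList (some sp) none).dropWhile (· == ' ')).length : Int)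

-- ===== PRECONDITION & SPEC =====
-- Pre_ restricts to the natural domain pos ≥ 0 (pos is a cursor index): for -len(line) ≤ pos < 0 A's
-- negative indexing wraps around the string and can even return a negative index, and for
-- pos < -len(line) on a nonempty line A raises IndexError.
def Pre_find_word_boundary_right_py (line : String) (pos : Int) : Prop := 0 ≤ pos
instance (line : String) (pos : Int) : Decidable (Pre_find_word_boundary_right_py line pos) := by unfold Pre_find_word_boundary_right_py; infer_instance
def pvWitness_find_word_boundary_right_py : String × Int := ("ab cd", 1)

def Spec_find_word_boundary_right_py (line : String) (pos : Int) (out : Int) : Prop := out = find_word_boundary_right_py_alt line pos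
instance (line : String) (pos : Int) (out : Int) : Decidable (Spec_find_word_boundary_right_py line pos out) := by unfold Spec_find_word_boundary_right_py; infer_instance

-- ===== CLAIM (what is proved, stated in full; the proofs are below) =====
def Claim_equal_find_word_boundary_right_py : Prop := ∀ (line : String) (pos : Int), Dom_find_word_boundary_right_py line pos → Pre_find_word_boundary_right_py line pos → Spec_find_word_boundary_right_py line pos (find_word_boundary_right_py line pos)

-- ===== LEMMAS AND PROOFS =====

-- A's word loop from a nonnegative index k advances over the maximal run of non-spaces starting at k
theorem pvwl_eq (cs : List Char) (k : Nat) :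
    pvAWordLoop cs (k : Int) = (k : Int) + (((cs.drop k).takeWhile (fun c => !(c == ' '))).length : Int) := by
  by_cases h : k < cs.length
  · have hget : PySem.List.pyGet? cs (k : Int) = some cs[k] := by
      simp [List.getElem?_eq_getElem h]
    have hdrop : cs.drop k = cs[k] :: cs.drop (k + 1) := List.drop_eq_getElem_cons h
    rw [pvAWordLoop, dif_pos (by exact_mod_cast h), hget]
    dsimp only
    by_cases hc : cs[k] = ' '
    · have hb : (cs[k] == ' ') = true := beq_iff_eq.mpr hc
      rw [if_neg (not_not_intro hc), hdrop, List.takeWhile_cons, hb]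
      simp
    · have ih := pvwl_eq cs (k + 1)
      push_cast at ih
      have hb : (cs[k] == ' ') = false := beq_false_of_ne hc
      rw [if_pos hc, ih, hdrop, List.takeWhile_cons, hb]
      simp
      ring
  · rw [pvAWordLoop, dif_neg (by exact_mod_cast h)]
    simp [List.drop_eq_nil_of_le (Nat.le_of_not_lt h)]
termination_by cs.length - k

-- A's space loop from a nonnegative index k advances over the maximal run of spaces starting at k
theorem pvsl_eq (cs : List Char) (k : Nat) :
    pvASpaceLoop cs (k : Int) = (k : Int) + (((cs.drop k).takeWhile (fun c => c == ' ')).length : Int) := by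
  by_cases h : k < cs.length
  · have hget : PySem.List.pyGet? cs (k : Int) = some cs[k] := by
      simp [List.getElem?_eq_getElem h]
    have hdrop : cs.drop k = cs[k] :: cs.drop (k + 1) := List.drop_eq_getElem_cons h
    rw [pvASpaceLoop, dif_pos (by exact_mod_cast h), hget]
    dsimp only
    by_cases hc : cs[k] = ' '
    · have ih := pvsl_eq cs (k + 1)
      push_cast at ih
      have hb : (cs[k] == ' ') = true := beq_iff_eq.mpr hc
      rw [if_pos hc, ih, hdrop, List.takeWhile_cons, hb]
      simp
      ring
    · have hb : (cs[k] == ' ') = false := beq_false_of_ne hc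
      rw [if_neg hc, hdrop, List.takeWhile_cons, hb]
      simp
  · rw [pvASpaceLoop, dif_neg (by exact_mod_cast h)]
    simp [List.drop_eq_nil_of_le (Nat.le_of_not_lt h)]
termination_by cs.length - k

theorem pv_tw_sat {α : Type} (p : α → Bool) (l : List α) (i : Nat)
    (h : i < (l.takeWhile p).length) : ∃ a, l[i]? = some a ∧ p a = true := by
  induction l generalizing i with
  | nil => simp at h
  | cons x xs ih =>
    by_cases hp : p x
    · cases i with
      | zero => exact ⟨x, by simp, hp⟩
      | succ i =>
        simp only [List.takeWhile_cons, hp, if_true, List.length_cons] at h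
        obtain ⟨a, ha, hpa⟩ := ih i (by omega)
        exact ⟨a, by simpa using ha, hpa⟩
    · simp [hp] at h

theorem pv_tw_stop {α : Type} (p : α → Bool) (l : List α)
    (h : (l.takeWhile p).length < l.length) :
    ∃ a, l[(l.takeWhile p).length]? = some a ∧ p a = false := by
  induction l with
  | nil => simp at h
  | cons x xs ih =>
    by_cases hp : p x
    · simp only [List.takeWhile_cons, hp, if_true, List.length_cons] at h ⊢
      simpa using ih (by omega)
    · exact ⟨x, by simp [hp], by simp [hp]⟩

theorem pv_singleton_prefix {α : Type} (c : α) (l : List α) : [c] <+: l ↔ l[0]? = some c := by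
  cases l with
  | nil => simp
  | cons x xs =>
    simp [List.cons_prefix_cons, eq_comm]

-- find on a singleton pattern lands on the end of the maximal run of non-matching characters
theorem pv_find_singleton (t : List Char) (hmem : ' ' ∈ t) :
    PySem.Chars.find t [' '] = (((t.takeWhile (fun c => !(c == ' '))).length : Nat) : Int) ∧
      (t.takeWhile (fun c => !(c == ' '))).length < t.length := by
  have hinf : [' '] <:+: t := by
    obtain ⟨s, u, rfl⟩ := List.append_of_mem hmem
    exact ⟨s, u, by simp⟩
  have hnn : 0 ≤ PySem.Chars.find t [' '] := (PySem.Chars.find_nonneg_iff t [' ']).2 hinf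
  obtain ⟨hpre, hmin⟩ := PySem.Chars.find_spec hnn
  set f := (PySem.Chars.find t [' ']).toNat with hf
  set j := (t.takeWhile (fun c => !(c == ' '))).length with hj
  have hfj : t[f]? = some ' ' := by
    have := (pv_singleton_prefix ' ' (t.drop f)).1 hpre
    simpa [List.getElem?_drop] using this
  have hflen : f < t.length := by
    by_contra hh
    rw [List.getElem?_eq_none (by omega)] at hfj
    cases hfj
  have hfeq : f = j := by
    rcases lt_trichotomy f j with h1 | h1 | h1
    · obtain ⟨a, ha, hpa⟩ := pv_tw_sat _ t f h1
      rw [hfj] at ha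
      cases ha
      simp at hpa
    · exact h1
    · have hjlen : j < t.length := lt_trans h1 hflen
      obtain ⟨a, ha, hpa⟩ := pv_tw_stop _ t hjlen
      have haeq : a = ' ' := by simpa using hpa
      subst haeq
      exact absurd ((pv_singleton_prefix ' ' (t.drop j)).2
        (by simpa [List.getElem?_drop] using ha)) (hmin j h1)
  constructor
  · omega
  · omega

-- ===== VERDICT (by name: the statement is the Claim_ definition above) =====
theorem find_word_boundary_right_py_spec : Claim_equal_find_word_boundary_right_py := by
  intro line pos _ hpre
  unfold Spec_find_word_boundary_right_py find_word_boundary_right_py find_word_boundary_right_py_alt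
  set cs := line.toList with hcs
  by_cases hge : pos ≥ (cs.length : Int)
  · simp [hge]
  · have hlt : pos < (cs.length : Int) := lt_of_not_ge hge
    obtain ⟨k, rfl⟩ : ∃ k : Nat, pos = (k : Int) := ⟨pos.toNat, (Int.toNat_of_nonneg hpre).symm⟩
    have hk : k < cs.length := by exact_mod_cast hlt
    rw [if_neg (by exact_mod_cast hge), if_neg (by exact_mod_cast hge)]
    have hff : PySem.Str.findFrom line " " (k : Int) none =
        if PySem.Chars.find (cs.drop k) [' '] = -1 then -1
        else (k : Int) + PySem.Chars.find (cs.drop k) [' '] := by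
      rw [PySem.Str.findFrom_eq, ← hcs]
      have : (" " : String).toList = [' '] := by decide
      rw [this, PySem.Chars.findFrom_natCast cs [' '] k (le_of_lt hk)]
    by_cases hmem : ' ' ∈ cs.drop k
    · -- a space exists to the right of pos
      obtain ⟨hfind, hjlen⟩ := pv_find_singleton (cs.drop k) hmem
      set j := ((cs.drop k).takeWhile (fun c => !(c == ' '))).length with hj
      have hkj : k + j < cs.length := by
        have := List.length_drop (l := cs) (i := k)
        omega
      have hsp : PySem.Str.findFrom line " " (k : Int) none = ((k + j : Nat) : Int) := by
        rw [hff, hfind, if_neg (by omega)]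
        push_cast
        ring
      rw [hsp, if_neg (by simp; omega)]
      -- A side: word loop then space loop
      rw [pvwl_eq cs k, ← hj]
      have hcast : (k : Int) + (j : Int) = ((k + j : Nat) : Int) := by push_cast; ring
      rw [hcast, pvsl_eq cs (k + j)]
      -- B side: slice from k+j then dropWhile
      rw [PySem.List.slice_from cs (by positivity), Int.toNat_natCast]
      have hsplit : ((cs.drop (k + j)).takeWhile (fun c => c == ' ')).length +
          ((cs.drop (k + j)).dropWhile (fun c => c == ' ')).length = cs.length - (k + j) := by
        have h1 : ((cs.drop (k + j)).takeWhile (fun c => c == ' ')) ++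
            ((cs.drop (k + j)).dropWhile (fun c => c == ' ')) = cs.drop (k + j) :=
          List.takeWhile_append_dropWhile
        have h2 := congrArg List.length h1
        simp only [List.length_append] at h2
        rw [h2, List.length_drop]
      push_cast
      omega
    · -- no space right of pos: both return n
      have hnf : PySem.Str.findFrom line " " (k : Int) none = -1 := by
        rw [PySem.Str.findFrom_eq, ← hcs]
        have h1 : (" " : String).toList = [' '] := by decide
        rw [h1, PySem.Chars.findFrom_natCast_eq_neg_one_iff cs [' '] k (le_of_lt hk)]
        intro hinf
        obtain ⟨s, u, he⟩ := hinf
        exact hmem (by rw [← he]; simp)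
      rw [hnf, if_pos rfl]
      -- A: word loop runs to the end, space loop is a no-op at n
      have htw : (cs.drop k).takeWhile (fun c => !(c == ' ')) = cs.drop k := by
        rw [List.takeWhile_eq_self_iff]
        intro a ha
        simp only [Bool.not_eq_true']
        exact beq_false_of_ne (fun he => hmem (he ▸ ha))
      rw [pvwl_eq cs k, htw, List.length_drop]
      have hcast : (k : Int) + ((cs.length - k : Nat) : Int) = ((cs.length : Nat) : Int) := by
        omega
      rw [hcast, pvsl_eq cs cs.length]
      simp
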